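-- pv_equiv track=rewrite | github.com/hamodikk/projectManagement | Problem_Solution.py | compute_peak_concurrency
-- ===== SOURCE A (Python) =====
-- def compute_peak_concurrency(schedule, worker_requirements):
--     # Gather all unique time instants when any task starts or finishes.
--     times = sorted({time for times in schedule.values() for time in times})
--     peak = {}
--
--     # For each time, compute the total number of workers required per role.
--     for t in times:
--         current = {}
--         for task, (start, finish) in schedule.items():
--             # A task is active if it has started but not yet finished at time t.
--             if start <= t < finish:
--                 for role, count in worker_requirements.get(task, {}).items():
--                     current[role] = current.get(role, 0) + count
--         # Update peak values.
--         for role, count in current.items():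
--             peak[role] = max(peak.get(role, 0), count)
--     return peak
-- ===== SOURCE B (Python) =====
-- def compute_peak_concurrency(schedule, worker_requirements):
--     # Sweep line: index each task's role requirements by its start/finish time once,
--     # then one pass over the sorted time instants updates per-role counts incrementally.
--     deltas = {}
--     for task, (start, finish) in schedule.items():
--         if start < finish:  # a task with an empty interval is never active
--             req = worker_requirements.get(task, {})
--             deltas.setdefault(finish, []).append((-1, req))
--             deltas.setdefault(start, []).append((1, req))
--     instants = sorted({t for interval in schedule.values() for t in interval})
--     running = {}
--     peak = {}
--     for t in instants:
--         for sign, req in deltas.get(t, []):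
--             for role, count in req.items():
--                 running[role] = running.get(role, 0) + sign * count
--         for role, count in running.items():
--             if role not in peak or peak[role] < count:
--                 peak[role] = max(0, count)
--     return peak
-- ===== Notes on version B (the rewrite author's own statement) =====
-- stated objective: faster
-- what changed: Replaces the per-time full rescan of all tasks (rebuilding the role counter from scratch at every time instant) by a sweep line: requirements are indexed once by start and finish time, and a single pass over the sorted time instants updates per-role counts incrementally while tracking maxima.
import Mathlib
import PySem

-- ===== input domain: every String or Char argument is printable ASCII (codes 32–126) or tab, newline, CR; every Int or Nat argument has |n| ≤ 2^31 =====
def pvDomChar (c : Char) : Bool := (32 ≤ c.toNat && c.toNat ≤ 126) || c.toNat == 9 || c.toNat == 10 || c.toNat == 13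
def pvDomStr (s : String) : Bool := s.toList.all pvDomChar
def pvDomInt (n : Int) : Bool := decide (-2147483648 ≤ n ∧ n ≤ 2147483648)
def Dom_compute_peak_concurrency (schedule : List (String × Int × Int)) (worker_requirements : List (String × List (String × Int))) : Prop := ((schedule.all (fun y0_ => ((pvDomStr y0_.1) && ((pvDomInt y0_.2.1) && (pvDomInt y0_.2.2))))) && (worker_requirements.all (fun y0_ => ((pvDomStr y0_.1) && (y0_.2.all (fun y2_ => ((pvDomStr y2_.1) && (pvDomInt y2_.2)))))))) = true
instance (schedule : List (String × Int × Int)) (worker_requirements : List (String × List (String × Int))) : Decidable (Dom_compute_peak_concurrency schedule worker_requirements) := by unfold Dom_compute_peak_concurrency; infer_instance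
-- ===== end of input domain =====

-- B replaces A's per-time-instant full rescan of all tasks by a sweep line: requirements are
-- indexed by start/finish time once and a single pass over the sorted instants updates per-role
-- counts incrementally; equivalence (same result list, including key order) is proved on all inputs.
-- ===== PORT A =====
def compute_peak_concurrency (schedule : List (String × Int × Int)) (worker_requirements : List (String × List (String × Int))) : List (String × Int) :=
  let sched := PySem.Dict.ofList schedule
  let wr := PySem.Dict.ofList (worker_requirements.map (fun p => (p.1, PySem.Dict.ofList p.2)))
  let times := PySem.List.sorted (PySem.Set.ofList (sched.items.flatMap (fun p => [p.2.1, p.2.2]))) (fun x => x) false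
  let peak := times.foldl (fun peak t =>
    let current := sched.items.foldl (fun current p =>
      if p.2.1 ≤ t ∧ t < p.2.2 then
        (wr.getD p.1 PySem.Dict.empty).items.foldl
          (fun current rc => current.modify rc.1 0 (· + rc.2)) current
      else current) PySem.Dict.empty
    current.items.foldl (fun peak rc => peak.insert rc.1 (max (peak.getD rc.1 0) rc.2)) peak)
    PySem.Dict.empty
  peak.items

-- ===== PORT B =====
def compute_peak_concurrency_alt (schedule : List (String × Int × Int)) (worker_requirements : List (String × List (String × Int))) : List (String × Int) :=
  let sched := PySem.Dict.ofList schedule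
  let wr := PySem.Dict.ofList (worker_requirements.map (fun p => (p.1, PySem.Dict.ofList p.2)))
  let deltas := sched.items.foldl
    (fun (deltas : PySem.Dict Int (List (Int × PySem.Dict String Int))) p =>
      if p.2.1 < p.2.2 then
        let req := wr.getD p.1 PySem.Dict.empty
        ((deltas.modify p.2.2 [] (· ++ [(-1, req)])).modify p.2.1 [] (· ++ [(1, req)]))
      else deltas) PySem.Dict.empty
  let instants := PySem.List.sorted (PySem.Set.ofList (sched.items.flatMap (fun p => [p.2.1, p.2.2]))) (fun x => x) false
  let rp := instants.foldl
    (fun (rp : PySem.Dict String Int × PySem.Dict String Int) t =>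
      let running := (deltas.getD t []).foldl
        (fun running sr => sr.2.items.foldl
          (fun running rc => running.modify rc.1 0 (· + sr.1 * rc.2)) running) rp.1
      let peak := running.items.foldl
        (fun peak rc =>
          if peak.contains rc.1 = false ∨ peak.getD rc.1 0 < rc.2 then
            peak.insert rc.1 (max 0 rc.2)
          else peak) rp.2
      (running, peak))
    (PySem.Dict.empty, PySem.Dict.empty)
  rp.2.items

-- ===== PRECONDITION & SPEC =====
def Spec_compute_peak_concurrency (schedule : List (String × Int × Int)) (worker_requirements : List (String × List (String × Int))) (out : List (String × Int)) : Prop := out = compute_peak_concurrency_alt schedule worker_requirements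
instance (schedule : List (String × Int × Int)) (worker_requirements : List (String × List (String × Int))) (out : List (String × Int)) : Decidable (Spec_compute_peak_concurrency schedule worker_requirements out) := by unfold Spec_compute_peak_concurrency; infer_instance

-- ===== CLAIM (what is proved, stated in full; the proofs are below) =====
def Claim_equal_compute_peak_concurrency : Prop := ∀ (schedule : List (String × Int × Int)) (worker_requirements : List (String × List (String × Int))), Dom_compute_peak_concurrency schedule worker_requirements → Spec_compute_peak_concurrency schedule worker_requirements (compute_peak_concurrency schedule worker_requirements)

-- ===== LEMMAS AND PROOFS =====

-- Proof-side abbreviations (shapes of the two ports' loops).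
def pvReq (wr : PySem.Dict String (PySem.Dict String Int)) (p : String × Int × Int) : List (String × Int) :=
  (wr.getD p.1 PySem.Dict.empty).items

def pvReqK (wr : PySem.Dict String (PySem.Dict String Int)) (p : String × Int × Int) : List String :=
  (pvReq wr p).map (·.1)

def pvSumr (l : List (String × Int)) (r : String) : Int :=
  ((l.filter (fun rc => rc.1 == r)).map (·.2)).sum

def pvRS (wr : PySem.Dict String (PySem.Dict String Int)) (p : String × Int × Int) (r : String) : Int :=
  pvSumr (pvReq wr p) r

def pvUpd (d : PySem.Dict String Int) (l : List (String × Int)) : PySem.Dict String Int :=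
  l.foldl (fun d rc => d.modify rc.1 0 (· + rc.2)) d

def pvPeakA (pk : PySem.Dict String Int) (l : List (String × Int)) : PySem.Dict String Int :=
  l.foldl (fun pk rc => pk.insert rc.1 (max (pk.getD rc.1 0) rc.2)) pk

def pvPeakB (pk : PySem.Dict String Int) (l : List (String × Int)) : PySem.Dict String Int :=
  l.foldl (fun pk rc =>
    if pk.contains rc.1 = false ∨ pk.getD rc.1 0 < rc.2 then pk.insert rc.1 (max 0 rc.2) else pk) pk

def pvCurA (wr : PySem.Dict String (PySem.Dict String Int)) (S : List (String × Int × Int)) (t : Int) : PySem.Dict String Int :=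
  pvUpd PySem.Dict.empty ((S.filter (fun p => decide (p.2.1 ≤ t ∧ t < p.2.2))).flatMap (pvReq wr))

def pvStepA (wr : PySem.Dict String (PySem.Dict String Int)) (S : List (String × Int × Int)) (pk : PySem.Dict String Int) (t : Int) : PySem.Dict String Int :=
  pvPeakA pk (pvCurA wr S t).items

def pvEntry (wr : PySem.Dict String (PySem.Dict String Int)) (p : String × Int × Int) : List (Int × (Int × PySem.Dict String Int)) :=
  if p.2.1 < p.2.2 then
    [(p.2.2, ((-1 : Int), wr.getD p.1 PySem.Dict.empty)), (p.2.1, ((1 : Int), wr.getD p.1 PySem.Dict.empty))]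
  else []

def pvScaled (sr : Int × PySem.Dict String Int) : List (String × Int) :=
  sr.2.items.map (fun rc => (rc.1, sr.1 * rc.2))

def pvFlat (wr : PySem.Dict String (PySem.Dict String Int)) (S : List (String × Int × Int)) (t : Int) : List (String × Int) :=
  ((((S.flatMap (pvEntry wr)).filter (fun e => e.1 == t)).map (·.2)).flatMap pvScaled)

def pvStepB (wr : PySem.Dict String (PySem.Dict String Int)) (S : List (String × Int × Int)) (cp : PySem.Dict String Int × PySem.Dict String Int) (t : Int) : PySem.Dict String Int × PySem.Dict String Int :=
  (pvUpd cp.1 (pvFlat wr S t), pvPeakB cp.2 (pvUpd cp.1 (pvFlat wr S t)).items)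

def pvTimes (S : List (String × Int × Int)) : List Int :=
  PySem.List.sorted (PySem.Set.ofList (S.flatMap (fun p => [p.2.1, p.2.2]))) (fun x => x) false

def pvNet (wr : PySem.Dict String (PySem.Dict String Int)) (S : List (String × Int × Int)) (P : List Int) (r : String) : Int :=
  (S.map (fun p =>
    (if p.2.1 < p.2.2 ∧ p.2.1 ∈ P then pvRS wr p r else 0)
      - (if p.2.1 < p.2.2 ∧ p.2.2 ∈ P then pvRS wr p r else 0))).sum

-- The two ports, rewritten as folds of the abbreviated step functions.
lemma pv_curA_eq (wr : PySem.Dict String (PySem.Dict String Int)) (S : List (String × Int × Int)) (t : Int) :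
    S.foldl (fun current p =>
      if p.2.1 ≤ t ∧ t < p.2.2 then
        (wr.getD p.1 PySem.Dict.empty).items.foldl
          (fun current rc => current.modify rc.1 0 (· + rc.2)) current
      else current) PySem.Dict.empty = pvCurA wr S t := by
  unfold pvCurA pvUpd
  rw [List.foldl_flatMap,
    ← PySem.List.foldl_ite_eq_foldl_filter (fun p : String × Int × Int => p.2.1 ≤ t ∧ t < p.2.2)
      (fun acc p => (pvReq wr p).foldl (fun d rc => d.modify rc.1 0 (· + rc.2)) acc) S
      PySem.Dict.empty]
  rfl

lemma pv_deltas_getD (wr : PySem.Dict String (PySem.Dict String Int)) (S : List (String × Int × Int)) (t : Int) :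
    (S.foldl (fun d p =>
        if p.2.1 < p.2.2 then
          ((d.modify p.2.2 [] (· ++ [((-1 : Int), wr.getD p.1 PySem.Dict.empty)])).modify p.2.1
            [] (· ++ [((1 : Int), wr.getD p.1 PySem.Dict.empty)]))
        else d) PySem.Dict.empty).getD t [] =
      ((S.flatMap (pvEntry wr)).filter (fun e => e.1 == t)).map (·.2) := by
  have h1 : S.foldl (fun d p =>
        if p.2.1 < p.2.2 then
          ((d.modify p.2.2 [] (· ++ [((-1 : Int), wr.getD p.1 PySem.Dict.empty)])).modify p.2.1
            [] (· ++ [((1 : Int), wr.getD p.1 PySem.Dict.empty)]))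
        else d) PySem.Dict.empty =
      (S.flatMap (pvEntry wr)).foldl (fun d e => d.modify e.1 [] (· ++ [e.2])) PySem.Dict.empty := by
    rw [List.foldl_flatMap]
    apply PySem.List.foldl_congr_mem
    intro acc p _
    by_cases hv : p.2.1 < p.2.2
    · simp [pvEntry, hv]
    · simp [pvEntry, hv]
  rw [h1, PySem.Dict.getD_foldl_modify_append]
  rfl


lemma pv_portA_shape (s : List (String × Int × Int)) (w : List (String × List (String × Int))) :
    compute_peak_concurrency s w =
      ((pvTimes (PySem.Dict.ofList s).items).foldl
        (pvStepA (PySem.Dict.ofList (w.map (fun p => (p.1, PySem.Dict.ofList p.2)))) (PySem.Dict.ofList s).items)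
        PySem.Dict.empty).items := by
  unfold compute_peak_concurrency pvTimes
  dsimp only
  congr 1
  apply PySem.List.foldl_congr_mem
  intro acc t _
  rw [pv_curA_eq]
  rfl

lemma pv_runB_eq (wr : PySem.Dict String (PySem.Dict String Int)) (S : List (String × Int × Int)) (t : Int) (c : PySem.Dict String Int) :
    ((S.foldl (fun d p =>
        if p.2.1 < p.2.2 then
          ((d.modify p.2.2 [] (· ++ [((-1 : Int), wr.getD p.1 PySem.Dict.empty)])).modify p.2.1
            [] (· ++ [((1 : Int), wr.getD p.1 PySem.Dict.empty)]))
        else d) PySem.Dict.empty).getD t []).foldl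
      (fun running sr => sr.2.items.foldl
        (fun running rc => running.modify rc.1 0 (· + sr.1 * rc.2)) running) c =
      pvUpd c (pvFlat wr S t) := by
  rw [pv_deltas_getD]
  unfold pvUpd pvFlat
  rw [List.foldl_flatMap, List.foldl_map, List.foldl_map]
  apply PySem.List.foldl_congr_mem
  intro c sr _
  unfold pvScaled
  rw [List.foldl_map]

lemma pv_portB_shape (s : List (String × Int × Int)) (w : List (String × List (String × Int))) :
    compute_peak_concurrency_alt s w =
      (((pvTimes (PySem.Dict.ofList s).items).foldl
        (pvStepB (PySem.Dict.ofList (w.map (fun p => (p.1, PySem.Dict.ofList p.2)))) (PySem.Dict.ofList s).items)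
        (PySem.Dict.empty, PySem.Dict.empty)).2).items := by
  unfold compute_peak_concurrency_alt pvTimes
  dsimp only
  congr 2
  apply PySem.List.foldl_congr_mem
  intro acc t _
  unfold pvStepB
  rw [← pv_runB_eq]
  rfl
-- Generic list facts.
lemma pv_sum_map_filter {α : Type} (l : List α) (q : α → Bool) (h : α → Int) :
    ((l.filter q).map h).sum = (l.map (fun x => if q x then h x else 0)).sum := by
  induction l with
  | nil => rfl
  | cons a l ih => by_cases hq : q a <;> simp [hq, ih]

lemma pv_sum_flatMap {α β : Type} (l : List α) (g : α → List β) (h : β → Int) :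
    ((l.flatMap g).map h).sum = (l.map (fun x => ((g x).map h).sum)).sum := by
  induction l with
  | nil => rfl
  | cons a l ih => simp [List.flatMap_cons, ih]

lemma pv_flatMap_ite_nil {α β : Type} (l : List α) (B : α → Prop) [DecidablePred B] (g : α → List β) :
    l.flatMap (fun x => if B x then g x else []) = (l.filter (fun x => decide (B x))).flatMap g := by
  induction l with
  | nil => rfl
  | cons a l ih => by_cases hb : B a <;> simp [hb, ih]

lemma pv_flatMap_congr {α β : Type} (l : List α) (f g : α → List β) (h : ∀ x ∈ l, f x = g x) :
    l.flatMap f = l.flatMap g := by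
  induction l with
  | nil => rfl
  | cons a l ih => simp [List.flatMap_cons, h a (by simp), ih (fun x hx => h x (by simp [hx]))]

lemma pv_ofList_filter (l : List String) (p : String → Bool) :
    PySem.Set.ofList (l.filter p) = (PySem.Set.ofList l).filter p := by
  induction l using List.reverseRecOn with
  | nil => rfl
  | append_singleton l x ih =>
    by_cases hp : p x = true
    · rw [List.filter_append, List.filter_singleton]
      simp only [hp, cond_true]
      rw [PySem.Set.ofList_append_singleton, PySem.Set.ofList_append_singleton, ih,
        PySem.Set.add_eq_ite, PySem.Set.add_eq_ite]
      by_cases hx : x ∈ l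
      · rw [if_pos (show x ∈ List.filter p (PySem.Set.ofList l) from by
            rw [List.mem_filter]; exact ⟨by simp [PySem.Set.mem_ofList, hx], hp⟩),
          if_pos (show x ∈ PySem.Set.ofList l by simp [PySem.Set.mem_ofList, hx])]
      · rw [if_neg (show x ∉ List.filter p (PySem.Set.ofList l) from by
            rw [List.mem_filter]; simp [PySem.Set.mem_ofList, hx]),
          if_neg (show x ∉ PySem.Set.ofList l by simp [PySem.Set.mem_ofList, hx]),
          List.filter_append, List.filter_singleton]
        simp [hp]
    · rw [List.filter_append, List.filter_singleton]
      simp only [hp, cond_false, List.append_nil]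
      rw [PySem.Set.ofList_append_singleton, ih, PySem.Set.add_eq_ite]
      by_cases hx : x ∈ l
      · rw [if_pos (by simp [PySem.Set.mem_ofList, hx])]
      · rw [if_neg (by simp [PySem.Set.mem_ofList, hx]), List.filter_append,
          List.filter_singleton]
        simp [hp]



-- pvSumr facts.
lemma pv_sumr_flatMap {α : Type} (l : List α) (g : α → List (String × Int)) (r : String) :
    pvSumr (l.flatMap g) r = (l.map (fun x => pvSumr (g x) r)).sum := by
  unfold pvSumr
  rw [List.filter_flatMap]
  exact pv_sum_flatMap l _ _


lemma pv_sumr_scaled (sr : Int × PySem.Dict String Int) (r : String) :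
    pvSumr (pvScaled sr) r = sr.1 * pvSumr sr.2.items r := by
  unfold pvSumr pvScaled
  rw [List.filter_map]
  simp only [Function.comp_def, List.map_map]
  rw [← List.sum_map_mul_left]


-- pvUpd facts.
lemma pv_sumr_cons (rc : String × Int) (l : List (String × Int)) (r : String) :
    pvSumr (rc :: l) r = (if rc.1 = r then rc.2 else 0) + pvSumr l r := by
  by_cases h : rc.1 = r
  · simp [pvSumr, h]
  · simp [pvSumr, h]


lemma pv_upd_getD (l : List (String × Int)) (d : PySem.Dict String Int) (r : String) :
    (pvUpd d l).getD r 0 = d.getD r 0 + pvSumr l r := by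
  induction l generalizing d with
  | nil => simp [pvUpd, pvSumr]
  | cons rc l ih =>
    show (pvUpd (d.modify rc.1 0 (· + rc.2)) l).getD r 0 = _
    rw [ih, pv_sumr_cons]
    by_cases h : r = rc.1
    · subst h
      rw [PySem.Dict.getD_modify_self, if_pos rfl]
      omega
    · rw [PySem.Dict.getD_modify_of_ne d 0 _ h, if_neg (fun hh => h hh.symm)]
      omega

lemma pv_upd_keys (l : List (String × Int)) (d : PySem.Dict String Int) :
    (pvUpd d l).keys = PySem.Set.update d.keys (l.map (·.1)) := by
  exact PySem.Dict.keys_foldl_modify_key l (·.1) 0 (fun _ rc v => v + rc.2) d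

lemma pv_upd_nodup (l : List (String × Int)) (d : PySem.Dict String Int) (h : d.keys.Nodup) :
    (pvUpd d l).keys.Nodup := by
  exact PySem.Dict.nodup_keys_foldl_modify_key l (·.1) 0 (fun _ rc v => v + rc.2) d h

-- pvPeakA / pvPeakB lemmas (l plays the role of cur.items).
lemma pv_peakA_keys (pk : PySem.Dict String Int) (l : List (String × Int)) :
    (pvPeakA pk l).keys = PySem.Set.update pk.keys (l.map (·.1)) := by
  exact PySem.Dict.keys_foldl_insert_key l (·.1) (fun pk rc => max (pk.getD rc.1 0) rc.2) pk

lemma pv_peakA_getD_not_mem (pk : PySem.Dict String Int) (l : List (String × Int)) (r : String)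
    (h : r ∉ l.map (·.1)) : (pvPeakA pk l).getD r 0 = pk.getD r 0 := by
  induction l generalizing pk with
  | nil => rfl
  | cons rc l ih =>
    simp only [List.map_cons, List.mem_cons, not_or] at h
    show (pvPeakA (pk.insert rc.1 _) l).getD r 0 = _
    rw [ih _ h.2, PySem.Dict.getD_insert_of_ne _ _ _ h.1]

lemma pv_peakA_getD_mem (pk : PySem.Dict String Int) (l : List (String × Int)) (r : String) (v : Int)
    (hnd : (l.map (·.1)).Nodup) (hm : (r, v) ∈ l) :
    (pvPeakA pk l).getD r 0 = max (pk.getD r 0) v := by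
  induction l generalizing pk with
  | nil => cases hm
  | cons rc l ih =>
    simp only [List.map_cons, List.nodup_cons] at hnd
    rcases List.mem_cons.mp hm with h | h
    · subst h
      show (pvPeakA (pk.insert r _) l).getD r 0 = _
      rw [pv_peakA_getD_not_mem _ _ _ hnd.1, PySem.Dict.getD_insert_self]
    · have hr : r ≠ rc.1 := fun he => hnd.1 (he ▸ List.mem_map.mpr ⟨(r, v), h, rfl⟩)
      show (pvPeakA (pk.insert rc.1 _) l).getD r 0 = _
      rw [ih _ hnd.2 h, PySem.Dict.getD_insert_of_ne _ _ _ hr]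

lemma pv_peakB_keys (pk : PySem.Dict String Int) (l : List (String × Int)) :
    (pvPeakB pk l).keys = PySem.Set.update pk.keys (l.map (·.1)) := by
  induction l generalizing pk with
  | nil => simp [pvPeakB]
  | cons rc l ih =>
    show (pvPeakB (if _ then pk.insert rc.1 (max 0 rc.2) else pk) l).keys = _
    rw [List.map_cons, PySem.Set.update_cons]
    by_cases hc : pk.contains rc.1 = false ∨ pk.getD rc.1 0 < rc.2
    · rw [if_pos hc, ih]
      congr 1
      by_cases hct : pk.contains rc.1 = true
      · rw [PySem.Dict.keys_insert_of_contains _ _ hct,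
          PySem.Set.add_of_mem ((PySem.Dict.contains_iff_mem_keys _ _).1 hct)]
      · have hcf : pk.contains rc.1 = false := by simpa using hct
        rw [PySem.Dict.keys_insert_of_not_contains _ _ hcf,
          PySem.Set.add_of_not_mem (fun hm => hct ((PySem.Dict.contains_iff_mem_keys _ _).2 hm))]
    · rw [if_neg hc, ih]
      congr 1
      have hct : pk.contains rc.1 = true := by
        by_cases h : pk.contains rc.1 = true
        · exact h
        · exact absurd (Or.inl (by simpa using h)) hc
      rw [PySem.Set.add_of_mem ((PySem.Dict.contains_iff_mem_keys _ _).1 hct)]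

lemma pv_peakB_getD_not_mem (pk : PySem.Dict String Int) (l : List (String × Int)) (r : String)
    (h : r ∉ l.map (·.1)) : (pvPeakB pk l).getD r 0 = pk.getD r 0 := by
  induction l generalizing pk with
  | nil => rfl
  | cons rc l ih =>
    simp only [List.map_cons, List.mem_cons, not_or] at h
    show (pvPeakB (if _ then pk.insert rc.1 (max 0 rc.2) else pk) l).getD r 0 = _
    rw [ih _ h.2]
    split_ifs
    · rw [PySem.Dict.getD_insert_of_ne _ _ _ h.1]
    · rfl

lemma pv_peakB_getD_mem (pk : PySem.Dict String Int) (l : List (String × Int)) (r : String) (v : Int)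
    (hnd : (l.map (·.1)).Nodup) (hm : (r, v) ∈ l) :
    (pvPeakB pk l).getD r 0 =
      if pk.contains r = false ∨ pk.getD r 0 < v then max 0 v else pk.getD r 0 := by
  induction l generalizing pk with
  | nil => cases hm
  | cons rc l ih =>
    simp only [List.map_cons, List.nodup_cons] at hnd
    rcases List.mem_cons.mp hm with h | h
    · have hr1 : rc.1 = r := by rw [← h]
      have hv : rc.2 = v := by rw [← h]
      show (pvPeakB (if pk.contains rc.1 = false ∨ pk.getD rc.1 0 < rc.2 then
          pk.insert rc.1 (max 0 rc.2) else pk) l).getD r 0 = _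
      rw [hr1, hv, pv_peakB_getD_not_mem _ _ _ (hr1 ▸ hnd.1)]
      by_cases hc : pk.contains r = false ∨ pk.getD r 0 < v
      · rw [if_pos hc, if_pos hc, PySem.Dict.getD_insert_self]
      · rw [if_neg hc, if_neg hc]
    · have hr : r ≠ rc.1 := fun he => hnd.1 (he ▸ List.mem_map.mpr ⟨(r, v), h, rfl⟩)
      show (pvPeakB (if pk.contains rc.1 = false ∨ pk.getD rc.1 0 < rc.2 then
          pk.insert rc.1 (max 0 rc.2) else pk) l).getD r 0 = _
      have h1 : (if pk.contains rc.1 = false ∨ pk.getD rc.1 0 < rc.2 then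
          pk.insert rc.1 (max 0 rc.2) else pk).getD r 0 = pk.getD r 0 := by
        split_ifs
        · exact PySem.Dict.getD_insert_of_ne _ _ _ hr
        · rfl
      have h2 : (if pk.contains rc.1 = false ∨ pk.getD rc.1 0 < rc.2 then
          pk.insert rc.1 (max 0 rc.2) else pk).contains r = pk.contains r := by
        split_ifs
        · rw [PySem.Dict.contains_insert]; simp [hr]
        · rfl
      rw [ih _ hnd.2 h, h1, h2]

lemma pv_peakB_pos (pk : PySem.Dict String Int) (l : List (String × Int))
    (h : ∀ r, 0 ≤ pk.getD r 0) : ∀ r, 0 ≤ (pvPeakB pk l).getD r 0 := by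
  induction l generalizing pk with
  | nil => exact h
  | cons rc l ih =>
    intro r
    show 0 ≤ (pvPeakB (if _ then pk.insert rc.1 (max 0 rc.2) else pk) l).getD r 0
    apply ih
    intro r'
    split_ifs
    · rw [PySem.Dict.getD_insert]
      split_ifs
      · exact le_max_left 0 _
      · exact h r'
    · exact h r' 

-- The one-step merge: updating the peak from A's fresh counter and from B's running counter agree.
lemma pv_merge (pk dA dB : PySem.Dict String Int)
    (hndpk : pk.keys.Nodup) (hndA : dA.keys.Nodup) (hndB : dB.keys.Nodup)
    (hkeys : PySem.Set.update pk.keys dA.keys = PySem.Set.update pk.keys dB.keys)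
    (hsub : ∀ r, r ∈ dA.keys → r ∈ dB.keys)
    (hval : ∀ r, r ∈ dA.keys → dA.getD r 0 = dB.getD r 0)
    (hneg : ∀ r, r ∈ dB.keys → r ∉ dA.keys → dB.getD r 0 ≤ 0 ∧ r ∈ pk.keys)
    (hpos : ∀ r, 0 ≤ pk.getD r 0) :
    pvPeakA pk dA.items = pvPeakB pk dB.items := by
  have hkA : dA.items.map (·.1) = dA.keys := rfl
  have hkB : dB.items.map (·.1) = dB.keys := rfl
  have hresAk : (pvPeakA pk dA.items).keys = PySem.Set.update pk.keys dA.keys := by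
    rw [pv_peakA_keys, hkA]
  have hresBk : (pvPeakB pk dB.items).keys = PySem.Set.update pk.keys dB.keys := by
    rw [pv_peakB_keys, hkB]
  have hndA' : (pvPeakA pk dA.items).keys.Nodup := by
    rw [hresAk]; exact PySem.Set.nodup_update _ _ hndpk
  have hndB' : (pvPeakB pk dB.items).keys.Nodup := by
    rw [hresBk]; exact PySem.Set.nodup_update _ _ hndpk
  apply PySem.Dict.ext
  rw [PySem.Dict.items_eq_map_keys _ hndA' 0, PySem.Dict.items_eq_map_keys _ hndB' 0,
    hresAk, hresBk, hkeys]
  apply List.map_congr_left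
  intro k _
  have hgoal : (pvPeakA pk dA.items).getD k 0 = (pvPeakB pk dB.items).getD k 0 := by
    by_cases hA : k ∈ dA.keys
    · have itemsA : (k, dA.getD k 0) ∈ dA.items := by
        rw [PySem.Dict.items_eq_map_keys dA hndA 0]; exact List.mem_map.mpr ⟨k, hA, rfl⟩
      have itemsB : (k, dB.getD k 0) ∈ dB.items := by
        rw [PySem.Dict.items_eq_map_keys dB hndB 0]
        exact List.mem_map.mpr ⟨k, hsub k hA, rfl⟩
      have hgA := pv_peakA_getD_mem pk dA.items k (dA.getD k 0) (hkA ▸ hndA) itemsA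
      have hgB := pv_peakB_getD_mem pk dB.items k (dB.getD k 0) (hkB ▸ hndB) itemsB
      rw [hgA, hgB, ← hval k hA]
      by_cases hc : pk.contains k = false
      · rw [if_pos (Or.inl hc), PySem.Dict.getD_of_not_contains pk 0 hc]
      · by_cases hlt : pk.getD k 0 < dA.getD k 0
        · rw [if_pos (Or.inr hlt), max_eq_right (le_of_lt hlt),
            max_eq_right (le_trans (hpos k) (le_of_lt hlt))]
        · rw [if_neg (by rintro (h | h) <;> [exact hc h; exact hlt h]),
            max_eq_left (not_lt.1 hlt)]
    · have hgA := pv_peakA_getD_not_mem pk dA.items k (by rw [hkA]; exact hA)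
      by_cases hB : k ∈ dB.keys
      · have itemsB : (k, dB.getD k 0) ∈ dB.items := by
          rw [PySem.Dict.items_eq_map_keys dB hndB 0]; exact List.mem_map.mpr ⟨k, hB, rfl⟩
        have hgB := pv_peakB_getD_mem pk dB.items k (dB.getD k 0) (hkB ▸ hndB) itemsB
        obtain ⟨hle, hpkmem⟩ := hneg k hB hA
        have hct : pk.contains k = true := (PySem.Dict.contains_iff_mem_keys _ _).2 hpkmem
        rw [hgA, hgB, if_neg (by
          rintro (h | h)
          · rw [hct] at h; cases h
          · exact absurd (lt_of_le_of_lt (hpos k) h) (not_lt.2 hle))]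
      · rw [hgA, pv_peakB_getD_not_mem pk dB.items k (by rw [hkB]; exact hB)]
  rw [hgoal]


-- Facts about the sorted list of time instants.
lemma pv_times_sorted (S : List (String × Int × Int)) : (pvTimes S).Pairwise (· < ·) := by
  have hle := PySem.List.sorted_pairwise
    (PySem.Set.ofList (S.flatMap (fun p => [p.2.1, p.2.2]))) (fun x => x)
  have hnd : (pvTimes S).Nodup := by
    unfold pvTimes
    exact ((PySem.List.sorted_perm _ _ _).nodup_iff).2 (PySem.Set.nodup_ofList _)
  exact (hnd.and hle).imp (fun h => lt_of_le_of_ne h.2 h.1)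

lemma pv_times_mem (S : List (String × Int × Int)) (p : String × Int × Int) (hp : p ∈ S) :
    p.2.1 ∈ pvTimes S ∧ p.2.2 ∈ pvTimes S := by
  have hmem : ∀ x, x ∈ pvTimes S ↔ x ∈ S.flatMap (fun p => [p.2.1, p.2.2]) := by
    intro x
    unfold pvTimes
    rw [(PySem.List.sorted_perm _ _ _).mem_iff, PySem.Set.mem_ofList]
  constructor
  · rw [hmem]; exact List.mem_flatMap.mpr ⟨p, hp, by simp⟩
  · rw [hmem]; exact List.mem_flatMap.mpr ⟨p, hp, by simp⟩

lemma pv_prefix_mem_le (times P rest : List Int) (t : Int)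
    (hsplit : times = P ++ t :: rest) (hsort : times.Pairwise (· < ·)) (x : Int)
    (hx : x ∈ times) : x ∈ P ++ [t] ↔ x ≤ t := by
  subst hsplit
  rw [List.pairwise_append] at hsort
  constructor
  · intro hx'
    rcases List.mem_append.mp hx' with h | h
    · exact le_of_lt (hsort.2.2 x h t (by simp))
    · simp at h; omega
  · intro hle
    rcases List.mem_append.mp hx with h | h
    · exact List.mem_append.mpr (Or.inl h)
    · rcases List.mem_cons.mp h with h | h
      · simp [h]
      · exact absurd ((List.pairwise_cons.mp hsort.2.1).1 x h) (by omega)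

lemma pv_prefix_mem_lt (times P rest : List Int) (t : Int)
    (hsplit : times = P ++ t :: rest) (hsort : times.Pairwise (· < ·)) (x : Int)
    (hx : x ∈ times) : x ∈ P ↔ x < t := by
  subst hsplit
  rw [List.pairwise_append] at hsort
  constructor
  · intro hx'
    exact hsort.2.2 x hx' t (by simp)
  · intro hlt
    rcases List.mem_append.mp hx with h | h
    · exact h
    · rcases List.mem_cons.mp h with h | h
      · omega
      · exact absurd ((List.pairwise_cons.mp hsort.2.1).1 x h) (by omega)

-- Value bookkeeping.
lemma pv_sumr_zero_of_not_mem (l : List (String × Int)) (r : String)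
    (h : r ∉ l.map (·.1)) : pvSumr l r = 0 := by
  unfold pvSumr
  rw [List.filter_eq_nil_iff.mpr (fun rc hrc => by
    simp only [beq_iff_eq]
    exact fun he => h (List.mem_map.mpr ⟨rc, hrc, he⟩))]
  rfl

lemma pv_if_split (A B : Prop) [Decidable A] [Decidable B] (hAB : ¬(A ∧ B)) (a : Int) :
    (if A ∨ B then a else 0) = (if A then a else 0) + (if B then a else 0) := by
  by_cases hA : A <;> by_cases hB : B <;> simp [hA, hB]
  exact absurd ⟨hA, hB⟩ hAB

lemma pv_flat_sumr (wr : PySem.Dict String (PySem.Dict String Int)) (S : List (String × Int × Int)) (t : Int) (r : String) :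
    pvSumr (pvFlat wr S t) r =
      (S.map (fun p =>
        (if p.2.1 < p.2.2 ∧ p.2.1 = t then pvRS wr p r else 0)
          - (if p.2.1 < p.2.2 ∧ p.2.2 = t then pvRS wr p r else 0))).sum := by
  unfold pvFlat
  rw [pv_sumr_flatMap, List.map_map]
  simp only [Function.comp_def]
  rw [List.map_congr_left (fun (e : Int × (Int × PySem.Dict String Int)) _ => pv_sumr_scaled e.2 r),
    pv_sum_map_filter, pv_sum_flatMap]
  apply congrArg List.sum
  apply List.map_congr_left
  intro p _
  by_cases hv : p.2.1 < p.2.2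
  · simp only [pvEntry, beq_iff_eq, hv, true_and, pvRS, pvReq]
    by_cases hf : p.2.2 = t <;> by_cases hs : p.2.1 = t <;> simp [hf, hs]
  · simp [pvEntry, hv]

lemma pv_net_nil (wr : PySem.Dict String (PySem.Dict String Int)) (S : List (String × Int × Int)) (r : String) :
    pvNet wr S [] r = 0 := by
  unfold pvNet
  rw [List.sum_eq_zero]
  intro x hx
  rcases List.mem_map.mp hx with ⟨p, _, rfl⟩
  simp

lemma pv_net_append (wr : PySem.Dict String (PySem.Dict String Int)) (S : List (String × Int × Int)) (P : List Int) (t : Int) (r : String)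
    (ht : t ∉ P) :
    pvNet wr S (P ++ [t]) r = pvNet wr S P r + pvSumr (pvFlat wr S t) r := by
  rw [pv_flat_sumr]
  unfold pvNet
  rw [← PySem.List.sum_map_add_int]
  apply congrArg List.sum
  apply List.map_congr_left
  intro p _
  simp only [List.mem_append, List.mem_singleton, and_or_left]
  rw [pv_if_split _ _ (by rintro ⟨⟨-, h1⟩, -, h2⟩; exact ht (h2 ▸ h1)) _,
    pv_if_split _ _ (by rintro ⟨⟨-, h1⟩, -, h2⟩; exact ht (h2 ▸ h1)) _]
  ring

lemma pv_curA_getD (wr : PySem.Dict String (PySem.Dict String Int)) (S : List (String × Int × Int)) (t : Int) (r : String) :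
    (pvCurA wr S t).getD r 0 =
      (S.map (fun p => if p.2.1 ≤ t ∧ t < p.2.2 then pvRS wr p r else 0)).sum := by
  unfold pvCurA
  rw [pv_upd_getD, pv_sumr_flatMap, pv_sum_map_filter,
    show (PySem.Dict.empty : PySem.Dict String Int).getD r 0 = 0 from rfl, zero_add]
  apply congrArg List.sum
  apply List.map_congr_left
  intro p _
  by_cases h : p.2.1 ≤ t ∧ t < p.2.2 <;> simp [h, pvRS]

lemma pv_net_eq_active (wr : PySem.Dict String (PySem.Dict String Int)) (S : List (String × Int × Int))
    (times P rest : List Int) (t : Int) (r : String)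
    (hsplit : times = P ++ t :: rest) (hsort : times.Pairwise (· < ·))
    (hmemS : ∀ p ∈ S, p.2.1 ∈ times ∧ p.2.2 ∈ times) :
    pvNet wr S (P ++ [t]) r = (pvCurA wr S t).getD r 0 := by
  rw [pv_curA_getD]
  unfold pvNet
  apply congrArg List.sum
  apply List.map_congr_left
  intro p hp
  have hs := pv_prefix_mem_le times P rest t hsplit hsort p.2.1 (hmemS p hp).1
  have hf := pv_prefix_mem_le times P rest t hsplit hsort p.2.2 (hmemS p hp).2
  simp only [hs, hf]
  split_ifs <;> omega

-- Key bookkeeping.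
def pvCtK (wr : PySem.Dict String (PySem.Dict String Int)) (S : List (String × Int × Int)) (t : Int) : List String :=
  ((S.filter (fun p => decide (p.2.1 ≤ t ∧ t < p.2.2))).flatMap (pvReq wr)).map (·.1)

def pvFlatK (wr : PySem.Dict String (PySem.Dict String Int)) (S : List (String × Int × Int)) (t : Int) : List String :=
  (pvFlat wr S t).map (·.1)

lemma pv_curA_keys (wr : PySem.Dict String (PySem.Dict String Int)) (S : List (String × Int × Int)) (t : Int) :
    (pvCurA wr S t).keys = PySem.Set.ofList (pvCtK wr S t) := by
  unfold pvCurA pvCtK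
  rw [pv_upd_keys]
  rw [show (PySem.Dict.empty : PySem.Dict String Int).keys = ([] : List String) from rfl,
    PySem.Set.update_nil_left]

lemma pv_ctk_mem (wr : PySem.Dict String (PySem.Dict String Int)) (S : List (String × Int × Int)) (t : Int) (r : String) :
    r ∈ pvCtK wr S t ↔ ∃ p ∈ S, (p.2.1 ≤ t ∧ t < p.2.2) ∧ r ∈ pvReqK wr p := by
  unfold pvCtK pvReqK
  constructor
  · intro hr
    rcases List.mem_map.mp hr with ⟨rc, hrc, rfl⟩
    rcases List.mem_flatMap.mp hrc with ⟨p, hpfil, hin⟩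
    rcases List.mem_filter.mp hpfil with ⟨hpS, hact⟩
    exact ⟨p, hpS, by simpa using hact, List.mem_map.mpr ⟨rc, hin, rfl⟩⟩
  · rintro ⟨p, hpS, hact, hr⟩
    rcases List.mem_map.mp hr with ⟨rc, hrc, rfl⟩
    exact List.mem_map.mpr ⟨rc, List.mem_flatMap.mpr
      ⟨p, List.mem_filter.mpr ⟨hpS, by simpa using hact⟩, hrc⟩, rfl⟩

lemma pv_flatMap_map {α β γ : Type} (l : List α) (f : α → β) (g : β → List γ) :
    (l.map f).flatMap g = l.flatMap (fun x => g (f x)) := by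
  induction l with
  | nil => rfl
  | cons a l ih => simp [List.flatMap_cons, ih]

lemma pv_flatk_mem (wr : PySem.Dict String (PySem.Dict String Int)) (S : List (String × Int × Int)) (t : Int) (r : String) :
    r ∈ pvFlatK wr S t ↔
      ∃ p ∈ S, p.2.1 < p.2.2 ∧ (p.2.2 = t ∨ p.2.1 = t) ∧ r ∈ pvReqK wr p := by
  unfold pvFlatK pvFlat
  constructor
  · intro h
    rcases List.mem_map.mp h with ⟨rc, hrc, rfl⟩
    rcases List.mem_flatMap.mp hrc with ⟨sr, hsr, hin⟩
    rcases List.mem_map.mp hsr with ⟨e, hef, rfl⟩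
    rcases List.mem_filter.mp hef with ⟨heE, het⟩
    rcases List.mem_flatMap.mp heE with ⟨p, hpS, he⟩
    by_cases hv : p.2.1 < p.2.2
    · rw [pvEntry, if_pos hv] at he
      rcases List.mem_cons.mp he with rfl | he1
      · refine ⟨p, hpS, hv, Or.inl (by simpa using het), ?_⟩
        rcases List.mem_map.mp hin with ⟨rc0, hrc0, rfl⟩
        exact List.mem_map.mpr ⟨rc0, hrc0, rfl⟩
      · rcases List.mem_cons.mp he1 with rfl | he2
        · refine ⟨p, hpS, hv, Or.inr (by simpa using het), ?_⟩
          rcases List.mem_map.mp hin with ⟨rc0, hrc0, rfl⟩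
          exact List.mem_map.mpr ⟨rc0, hrc0, rfl⟩
        · cases he2
    · rw [pvEntry, if_neg hv] at he
      cases he
  · rintro ⟨p, hpS, hv, hor, hr⟩
    rcases List.mem_map.mp hr with ⟨rc0, hrc0, rfl⟩
    rcases hor with hf | hs
    · apply List.mem_map.mpr
      refine ⟨(rc0.1, (-1 : Int) * rc0.2), ?_, rfl⟩
      apply List.mem_flatMap.mpr
      refine ⟨((-1 : Int), wr.getD p.1 PySem.Dict.empty), ?_, List.mem_map.mpr ⟨rc0, hrc0, rfl⟩⟩
      apply List.mem_map.mpr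
      refine ⟨(p.2.2, ((-1 : Int), wr.getD p.1 PySem.Dict.empty)), ?_, rfl⟩
      apply List.mem_filter.mpr
      refine ⟨List.mem_flatMap.mpr ⟨p, hpS, ?_⟩, by simpa using hf⟩
      rw [pvEntry, if_pos hv]
      simp
    · apply List.mem_map.mpr
      refine ⟨(rc0.1, (1 : Int) * rc0.2), ?_, rfl⟩
      apply List.mem_flatMap.mpr
      refine ⟨((1 : Int), wr.getD p.1 PySem.Dict.empty), ?_, List.mem_map.mpr ⟨rc0, hrc0, rfl⟩⟩
      apply List.mem_map.mpr
      refine ⟨(p.2.1, ((1 : Int), wr.getD p.1 PySem.Dict.empty)), ?_, rfl⟩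
      apply List.mem_filter.mpr
      refine ⟨List.mem_flatMap.mpr ⟨p, hpS, ?_⟩, by simpa using hs⟩
      rw [pvEntry, if_pos hv]
      simp

-- The freshly-activated keys coincide, in order, on the two sides.
lemma pv_newkeys (wr : PySem.Dict String (PySem.Dict String Int)) (S : List (String × Int × Int))
    (times P rest : List Int) (t : Int) (ks : PySem.Set String)
    (hsplit : times = P ++ t :: rest) (hsort : times.Pairwise (· < ·))
    (hmemS : ∀ p ∈ S, p.2.1 ∈ times ∧ p.2.2 ∈ times)
    (hold : ∀ r, r ∈ ks ↔ ∃ p ∈ S, p.2.1 < p.2.2 ∧ p.2.1 ∈ P ∧ r ∈ pvReqK wr p) :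
    (pvCtK wr S t).filter (fun y => !(PySem.Set.contains ks y)) =
      (pvFlatK wr S t).filter (fun y => !(PySem.Set.contains ks y)) := by
  have hkill : ∀ p ∈ S, p.2.1 < p.2.2 → p.2.1 < t →
      (pvReqK wr p).filter (fun y => !(PySem.Set.contains ks y)) = [] := by
    intro p hp hv hlt
    apply List.filter_eq_nil_iff.mpr
    intro y hy
    have hmem : y ∈ ks := (hold y).mpr ⟨p, hp, hv,
      (pv_prefix_mem_lt times P rest t hsplit hsort p.2.1 (hmemS p hp).1).mpr hlt, hy⟩
    simpa using hmem
  have hA : (pvCtK wr S t).filter (fun y => !(PySem.Set.contains ks y)) =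
      S.flatMap (fun p => if p.2.1 < p.2.2 ∧ p.2.1 = t then
        (pvReqK wr p).filter (fun y => !(PySem.Set.contains ks y)) else []) := by
    unfold pvCtK
    rw [List.map_flatMap]
    try simp only [Function.comp_def]
    rw [List.filter_flatMap,
      ← pv_flatMap_ite_nil S (fun p => p.2.1 ≤ t ∧ t < p.2.2)
        (fun p => ((pvReq wr p).map (·.1)).filter (fun y => !(PySem.Set.contains ks y)))]
    apply pv_flatMap_congr
    intro p hp
    by_cases hc : p.2.1 < p.2.2 ∧ p.2.1 = t
    · rw [if_pos (by omega), if_pos hc]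
      rfl
    · by_cases ha : p.2.1 ≤ t ∧ t < p.2.2
      · rw [if_pos ha, if_neg hc]
        exact hkill p hp (by omega) (by omega)
      · rw [if_neg ha, if_neg hc]
  have hB : (pvFlatK wr S t).filter (fun y => !(PySem.Set.contains ks y)) =
      S.flatMap (fun p => if p.2.1 < p.2.2 ∧ p.2.1 = t then
        (pvReqK wr p).filter (fun y => !(PySem.Set.contains ks y)) else []) := by
    unfold pvFlatK pvFlat
    rw [List.map_flatMap]
    simp only [Function.comp_def, pvScaled, List.map_map]
    rw [pv_flatMap_map, List.filter_flatMap, List.filter_flatMap, List.flatMap_assoc]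
    apply pv_flatMap_congr
    intro p hp
    by_cases hv : p.2.1 < p.2.2
    · rw [pvEntry, if_pos hv]
      by_cases hf : p.2.2 = t <;> by_cases hs : p.2.1 = t
      · exact absurd hv (by omega)
      · have hfil : ([(p.2.2, ((-1 : Int), wr.getD p.1 PySem.Dict.empty)),
            (p.2.1, ((1 : Int), wr.getD p.1 PySem.Dict.empty))].filter
              (fun e => e.1 == t)) = [(p.2.2, ((-1 : Int), wr.getD p.1 PySem.Dict.empty))] := by
          simp [hf, hs]
        rw [hfil]
        simp only [List.flatMap_cons, List.flatMap_nil, List.append_nil]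
        rw [if_neg (fun h => hs h.2)]
        exact hkill p hp hv (by omega)
      · have hfil : ([(p.2.2, ((-1 : Int), wr.getD p.1 PySem.Dict.empty)),
            (p.2.1, ((1 : Int), wr.getD p.1 PySem.Dict.empty))].filter
              (fun e => e.1 == t)) = [(p.2.1, ((1 : Int), wr.getD p.1 PySem.Dict.empty))] := by
          simp [hf, hs]
        rw [hfil]
        simp only [List.flatMap_cons, List.flatMap_nil, List.append_nil]
        rw [if_pos ⟨hv, hs⟩]
        rfl
      · have hfil : ([(p.2.2, ((-1 : Int), wr.getD p.1 PySem.Dict.empty)),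
            (p.2.1, ((1 : Int), wr.getD p.1 PySem.Dict.empty))].filter
              (fun e => e.1 == t)) = [] := by
          simp [hf, hs]
        rw [hfil]
        rw [if_neg (fun h => hs h.2)]
        rfl
    · rw [pvEntry, if_neg hv, if_neg (fun h => hv h.1)]
      rfl
  rw [hA, hB]

-- Small Set helpers.
lemma pv_filter_not_contains_self (s : PySem.Set String) :
    s.filter (fun y => !(PySem.Set.contains s y)) = [] := by
  apply List.filter_eq_nil_iff.mpr
  intro y hy
  simpa using hy

lemma pv_filter_idem (l : List String) (q : String → Bool) :
    (l.filter q).filter q = l.filter q := by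
  rw [List.filter_filter]
  exact List.filter_congr (fun a _ => Bool.and_self _)

lemma pv_update_self (s : PySem.Set String) (h : s.Nodup) : PySem.Set.update s s = s := by
  rw [PySem.Set.update_eq_append_filter, PySem.Set.ofList_eq_self_of_nodup _ h,
    pv_filter_not_contains_self, List.append_nil]

-- The main inductive invariant along the sorted time instants.
lemma pv_main (wr : PySem.Dict String (PySem.Dict String Int)) (S : List (String × Int × Int))
    (times P rest : List Int)
    (htimes : times = P ++ rest) (hsort : times.Pairwise (· < ·))
    (hmemS : ∀ p ∈ S, p.2.1 ∈ times ∧ p.2.2 ∈ times)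
    (cur pk : PySem.Dict String Int)
    (hndcur : cur.keys.Nodup) (hK1 : pk.keys = cur.keys)
    (hH1 : ∀ r, cur.getD r 0 = pvNet wr S P r)
    (hK2 : ∀ r, r ∈ cur.keys ↔ ∃ p ∈ S, p.2.1 < p.2.2 ∧ p.2.1 ∈ P ∧ r ∈ pvReqK wr p)
    (hH5 : ∀ r, 0 ≤ pk.getD r 0) :
    rest.foldl (pvStepA wr S) pk = (rest.foldl (pvStepB wr S) (cur, pk)).2 := by
  induction rest generalizing P cur pk with
  | nil => rfl
  | cons t rest ih =>
    have hsplit : times = P ++ t :: rest := htimes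
    have hPle : ∀ x ∈ times, (x ∈ P ++ [t] ↔ x ≤ t) :=
      fun x hx => pv_prefix_mem_le times P rest t hsplit hsort x hx
    have hPlt : ∀ x ∈ times, (x ∈ P ↔ x < t) :=
      fun x hx => pv_prefix_mem_lt times P rest t hsplit hsort x hx
    have htP : t ∉ P := fun h => by
      have := (hPlt t (by rw [hsplit]; simp)).1 h
      omega
    have hndpk : pk.keys.Nodup := hK1 ▸ hndcur
    have hnd' : (pvUpd cur (pvFlat wr S t)).keys.Nodup := pv_upd_nodup _ _ hndcur
    have hH1' : ∀ r, (pvUpd cur (pvFlat wr S t)).getD r 0 = pvNet wr S (P ++ [t]) r := by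
      intro r
      rw [pv_upd_getD, hH1, pv_net_append wr S P t r htP]
    have hcurAeq : ∀ r, (pvCurA wr S t).getD r 0 = (pvUpd cur (pvFlat wr S t)).getD r 0 := by
      intro r
      rw [hH1' r]
      exact (pv_net_eq_active wr S times P rest t r hsplit hsort hmemS).symm
    have hkeys' : (pvUpd cur (pvFlat wr S t)).keys = PySem.Set.update pk.keys (pvFlatK wr S t) := by
      rw [pv_upd_keys, ← hK1]
      rfl
    have hcurAkeysmem : ∀ r, r ∈ (pvCurA wr S t).keys ↔
        ∃ p ∈ S, (p.2.1 ≤ t ∧ t < p.2.2) ∧ r ∈ pvReqK wr p := by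
      intro r
      rw [pv_curA_keys, PySem.Set.mem_ofList]
      exact pv_ctk_mem wr S t r
    have hK2' : ∀ r, r ∈ (pvUpd cur (pvFlat wr S t)).keys ↔
        ∃ p ∈ S, p.2.1 < p.2.2 ∧ p.2.1 ∈ P ++ [t] ∧ r ∈ pvReqK wr p := by
      intro r
      rw [hkeys', PySem.Set.mem_update]
      constructor
      · rintro (hr | hr)
        · rcases (hK2 r).mp (hK1 ▸ hr) with ⟨p, hp, hv, hsP, hk⟩
          exact ⟨p, hp, hv, List.mem_append.mpr (Or.inl hsP), hk⟩
        · rcases (pv_flatk_mem wr S t r).mp hr with ⟨p, hp, hv, hor, hk⟩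
          rcases hor with hf | hs
          · exact ⟨p, hp, hv, List.mem_append.mpr (Or.inl
              ((hPlt p.2.1 (hmemS p hp).1).mpr (by omega))), hk⟩
          · exact ⟨p, hp, hv, List.mem_append.mpr (Or.inr (by simp [hs])), hk⟩
      · rintro ⟨p, hp, hv, hst, hk⟩
        rcases List.mem_append.mp hst with h | h
        · exact Or.inl (hK1 ▸ (hK2 r).mpr ⟨p, hp, hv, h, hk⟩)
        · exact Or.inr ((pv_flatk_mem wr S t r).mpr ⟨p, hp, hv, Or.inr (by simpa using h), hk⟩)
    have hold : ∀ r, r ∈ pk.keys ↔ ∃ p ∈ S, p.2.1 < p.2.2 ∧ p.2.1 ∈ P ∧ r ∈ pvReqK wr p := by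
      intro r
      rw [hK1]
      exact hK2 r
    have hnewk := pv_newkeys wr S times P rest t pk.keys hsplit hsort hmemS hold
    have hndA : (pvCurA wr S t).keys.Nodup := pv_upd_nodup _ _ List.nodup_nil
    have hFsetnd : ((PySem.Set.ofList (pvFlatK wr S t)).filter
        (fun y => !(PySem.Set.contains pk.keys y))).Nodup :=
      (PySem.Set.nodup_ofList _).filter _
    have hkeysmerge : PySem.Set.update pk.keys (pvCurA wr S t).keys =
        PySem.Set.update pk.keys (pvUpd cur (pvFlat wr S t)).keys := by
      rw [pv_curA_keys, hkeys',
        PySem.Set.update_eq_append_filter pk.keys (PySem.Set.ofList (pvCtK wr S t)),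
        PySem.Set.update_eq_append_filter pk.keys
          (PySem.Set.update pk.keys (pvFlatK wr S t))]
      congr 1
      rw [PySem.Set.ofList_ofList,
        PySem.Set.ofList_eq_self_of_nodup _ (PySem.Set.nodup_update _ _ hndpk),
        PySem.Set.update_eq_append_filter pk.keys (pvFlatK wr S t), List.filter_append,
        pv_filter_not_contains_self, List.nil_append, pv_filter_idem,
        ← pv_ofList_filter, ← pv_ofList_filter, hnewk]
    have hsub : ∀ r, r ∈ (pvCurA wr S t).keys → r ∈ (pvUpd cur (pvFlat wr S t)).keys := by
      intro r hr
      rcases (hcurAkeysmem r).mp hr with ⟨p, hp, hact, hk⟩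
      exact (hK2' r).mpr ⟨p, hp, by omega,
        (hPle p.2.1 (hmemS p hp).1).mpr (by omega), hk⟩
    have hneg : ∀ r, r ∈ (pvUpd cur (pvFlat wr S t)).keys → r ∉ (pvCurA wr S t).keys →
        (pvUpd cur (pvFlat wr S t)).getD r 0 ≤ 0 ∧ r ∈ pk.keys := by
      intro r hr hnr
      constructor
      · rw [hH1' r]
        apply le_of_eq
        unfold pvNet
        apply List.sum_eq_zero
        intro x hx
        rcases List.mem_map.mp hx with ⟨p, hp, rfl⟩
        by_cases hvsP : p.2.1 < p.2.2 ∧ p.2.1 ∈ P ++ [t]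
        · by_cases hfP : p.2.2 ∈ P ++ [t]
          · rw [if_pos hvsP, if_pos ⟨hvsP.1, hfP⟩]
            ring
          · have hact : p.2.1 ≤ t ∧ t < p.2.2 := by
              refine ⟨(hPle _ (hmemS p hp).1).1 hvsP.2, ?_⟩
              by_cases hle : p.2.2 ≤ t
              · exact absurd ((hPle _ (hmemS p hp).2).mpr hle) hfP
              · omega
            have hrk : r ∉ pvReqK wr p :=
              fun hk => hnr ((hcurAkeysmem r).mpr ⟨p, hp, hact, hk⟩)
            rw [if_pos hvsP, if_neg (fun h => hfP h.2),
              show pvRS wr p r = 0 from pv_sumr_zero_of_not_mem _ _ hrk]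
            ring
        · rw [if_neg hvsP, if_neg (fun h => hvsP ⟨h.1, (hPle _ (hmemS p hp).1).2 (by
            have := (hPle _ (hmemS p hp).2).1 h.2
            omega)⟩)]
          ring
      · rcases (hK2' r).mp hr with ⟨p, hp, hv, hst, hk⟩
        rcases List.mem_append.mp hst with h | h
        · exact (hold r).mpr ⟨p, hp, hv, h, hk⟩
        · exact absurd ((hcurAkeysmem r).mpr ⟨p, hp,
            ⟨by simp at h; omega, by simp at h; omega⟩, hk⟩) hnr
    have hstep : pvStepA wr S pk t = (pvStepB wr S (cur, pk) t).2 :=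
      pv_merge pk (pvCurA wr S t) (pvUpd cur (pvFlat wr S t)) hndpk hndA hnd' hkeysmerge hsub
        (fun r _ => hcurAeq r) hneg hH5
    have hK1' : (pvPeakB pk (pvUpd cur (pvFlat wr S t)).items).keys =
        (pvUpd cur (pvFlat wr S t)).keys := by
      rw [pv_peakB_keys, show ((pvUpd cur (pvFlat wr S t)).items.map (·.1)) =
        (pvUpd cur (pvFlat wr S t)).keys from rfl, hkeys',
        PySem.Set.update_eq_append_filter pk.keys (pvFlatK wr S t),
        PySem.Set.update_append, pv_update_self pk.keys hndpk,
        PySem.Set.update_eq_append_filter pk.keys _,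
        PySem.Set.ofList_eq_self_of_nodup _ hFsetnd, pv_filter_idem]
    have hH5' : ∀ r, 0 ≤ (pvPeakB pk (pvUpd cur (pvFlat wr S t)).items).getD r 0 :=
      pv_peakB_pos pk _ hH5
    simp only [List.foldl_cons]
    rw [hstep]
    exact ih (P ++ [t]) (by rw [hsplit]; simp) (pvUpd cur (pvFlat wr S t)) _ hnd' hK1' hH1'
      hK2' hH5' 

-- ===== VERDICT (by name: the statement is the Claim_ definition above) =====
set_option maxHeartbeats 1000000 in
theorem compute_peak_concurrency_spec : Claim_equal_compute_peak_concurrency := by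
  intro s w _
  unfold Spec_compute_peak_concurrency
  rw [pv_portA_shape, pv_portB_shape]
  apply congrArg PySem.Dict.items
  apply pv_main _ _ _ [] _ rfl (pv_times_sorted _) (fun p hp => pv_times_mem _ p hp)
  · exact List.nodup_nil
  · rfl
  · intro r
    rw [pv_net_nil]
    rfl
  · intro r
    simp
  · intro r
    exact le_refl 0
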